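-- pv_equiv track=rewrite | github.com/codercoder1709/NuggetV1 | src/preprocessing/preprocess_and_index.py | determine_restaurant_type
-- ===== SOURCE A (Python) =====
-- def determine_restaurant_type(menu):
--     has_veg = any(item["type"] == "veg" for item in menu)
--     has_non_veg = any(item["type"] == "non-veg" for item in menu)
--     if has_veg and has_non_veg:
--         return "veg and non-veg"
--     if has_veg:
--         return "pure veg"
--     if has_non_veg:
--         return "non-veg"
--     return "unknown"
-- ===== SOURCE B (Python) =====
-- def determine_restaurant_type(menu):
--     has_veg = False
--     has_non_veg = False
--     for item in menu:
--         t = item["type"]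
--         if t == "veg":
--             has_veg = True
--         elif t == "non-veg":
--             has_non_veg = True
--         if has_veg and has_non_veg:
--             return "veg and non-veg"
--     if has_veg:
--         return "pure veg"
--     if has_non_veg:
--         return "non-veg"
--     return "unknown"
-- ===== Notes on version B (the rewrite author's own statement) =====
-- stated objective: alternative
-- what changed: Replaced the two separate any() scans over the menu with a single loop maintaining has_veg/has_non_veg flags that returns early as soon as both are seen.
import Mathlib
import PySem

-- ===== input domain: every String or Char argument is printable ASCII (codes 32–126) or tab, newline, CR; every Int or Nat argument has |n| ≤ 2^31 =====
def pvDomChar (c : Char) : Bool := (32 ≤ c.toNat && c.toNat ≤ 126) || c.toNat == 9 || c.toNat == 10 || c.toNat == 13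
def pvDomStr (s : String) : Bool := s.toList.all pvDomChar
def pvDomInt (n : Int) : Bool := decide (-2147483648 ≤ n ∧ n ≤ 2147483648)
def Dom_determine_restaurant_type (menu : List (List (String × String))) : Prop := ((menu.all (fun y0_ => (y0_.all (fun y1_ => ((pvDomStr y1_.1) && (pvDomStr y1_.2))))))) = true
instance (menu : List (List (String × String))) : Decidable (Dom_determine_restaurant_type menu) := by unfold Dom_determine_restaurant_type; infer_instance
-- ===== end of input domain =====

-- B replaces A's two any() scans with one early-exiting loop over the menu (alternative decomposition, same cost).
-- ===== PORT A =====
-- item["type"] : first-match lookup in the association list; missing key (KeyError) is excluded by Pre_.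
def pvDictGet (item : List (String × String)) (k : String) : String :=
  match item.find? (fun p => p.1 == k) with
  | some p => p.2
  | none => ""

def determine_restaurant_type (menu : List (List (String × String))) : String :=
  let has_veg := menu.any (fun item => pvDictGet item "type" == "veg")
  let has_non_veg := menu.any (fun item => pvDictGet item "type" == "non-veg")
  if has_veg && has_non_veg then "veg and non-veg"
  else if has_veg then "pure veg"
  else if has_non_veg then "non-veg"
  else "unknown"

-- ===== PORT B =====
def pvLoop : List (List (String × String)) → Bool → Bool → Bool × Bool
  | [], hv, hn => (hv, hn)
  | item :: rest, hv, hn =>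
    let t := pvDictGet item "type"
    let hv' := if t == "veg" then true else hv
    let hn' := if t == "veg" then hn else (if t == "non-veg" then true else hn)
    if hv' && hn' then (true, true) else pvLoop rest hv' hn'

def determine_restaurant_type_alt (menu : List (List (String × String))) : String :=
  let r := pvLoop menu false false
  if r.1 && r.2 then "veg and non-veg"
  else if r.1 then "pure veg"
  else if r.2 then "non-veg"
  else "unknown"

-- ===== PRECONDITION & SPEC =====
-- Pre_ excludes exactly the menus on which Python A raises KeyError: those where an item without a
-- "type" key occurs before both a veg item and a non-veg item have been seen (B raises on the same inputs).
def Pre_determine_restaurant_type (menu : List (List (String × String))) : Prop :=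
  ((List.range menu.length).all (fun i =>
    ((menu.getD i []).any (fun p => p.1 == "type")) ||
    (((menu.take i).any (fun it => ((it.find? (fun p => p.1 == "type")).map (·.2)).getD "" == "veg")) &&
     ((menu.take i).any (fun it => ((it.find? (fun p => p.1 == "type")).map (·.2)).getD "" == "non-veg"))))) = true
instance (menu : List (List (String × String))) : Decidable (Pre_determine_restaurant_type menu) := by unfold Pre_determine_restaurant_type; infer_instance
def pvWitness_determine_restaurant_type : (List (List (String × String))) :=
  [[("type", "veg")], [("type", "non-veg"), ("name", "x")]]
def Spec_determine_restaurant_type (menu : List (List (String × String))) (out : String) : Prop := out = determine_restaurant_type_alt menu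
instance (menu : List (List (String × String))) (out : String) : Decidable (Spec_determine_restaurant_type menu out) := by unfold Spec_determine_restaurant_type; infer_instance

-- ===== CLAIM (what is proved, stated in full; the proofs are below) =====
def Claim_equal_determine_restaurant_type : Prop := ∀ (menu : List (List (String × String))), Dom_determine_restaurant_type menu → Pre_determine_restaurant_type menu → Spec_determine_restaurant_type menu (determine_restaurant_type menu)

-- ===== LEMMAS AND PROOFS =====
theorem pvLoop_eq (menu : List (List (String × String))) :
    ∀ hv hn, pvLoop menu hv hn =
      (hv || menu.any (fun item => pvDictGet item "type" == "veg"),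
       hn || menu.any (fun item => pvDictGet item "type" == "non-veg")) := by
  induction menu with
  | nil => intro hv hn; simp [pvLoop]
  | cons item rest ih =>
    intro hv hn
    simp only [pvLoop, List.any_cons]
    by_cases hveg : pvDictGet item "type" == "veg"
    · have hnv : (pvDictGet item "type" == "non-veg") = false := by
        simp_all
      by_cases h : hn
      · simp [hveg, hnv, h]
      · simp only [hveg, hnv, if_true]
        simp only [Bool.not_eq_true] at h
        subst h
        simp [ih]
    · by_cases hnv : pvDictGet item "type" == "non-veg"
      · by_cases h : hv
        · simp [hveg, hnv, h]
        · simp only [Bool.not_eq_true] at h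
          subst h
          simp [hveg, hnv, ih]
      · cases hv <;> cases hn <;> simp [hveg, hnv, ih]

-- ===== VERDICT (by name: the statement is the Claim_ definition above) =====
theorem determine_restaurant_type_spec : Claim_equal_determine_restaurant_type := by
  intro menu _ _
  unfold Spec_determine_restaurant_type determine_restaurant_type determine_restaurant_type_alt
  rw [pvLoop_eq]
  simp
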